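-- pv_equiv track=rewrite | github.com/GaneshDandekar26/SAGE | ml_pipeline/features/attack_features.py | _score_headers
-- ===== SOURCE A (Python) =====
-- _BROWSER_HEADERS = [
--     "Accept",
--     "Accept-Language",
--     "Accept-Encoding",
--     "Connection",
-- ]
--
-- def _score_headers(headers: dict[str, str]) -> int:
--     """Count how many standard browser headers are present (0-4)."""
--     if not headers:
--         return 0
--     score = 0
--     for h in _BROWSER_HEADERS:
--         if h.lower() in {k.lower() for k in headers}:
--             score += 1
--     return score
-- ===== SOURCE B (Python) =====
-- _BROWSER_HEADERS = [
--     "Accept",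
--     "Accept-Language",
--     "Accept-Encoding",
--     "Connection",
-- ]
--
-- def _score_headers(headers: dict[str, str]) -> int:
--     # Single pass over the INPUT keys, eliminating each matched browser name
--     # from a shrinking worklist; the score is how many names were eliminated.
--     remaining = [h.lower() for h in _BROWSER_HEADERS]
--     for k in headers:
--         kl = k.lower()
--         if kl in remaining:
--             remaining.remove(kl)
--     return len(_BROWSER_HEADERS) - len(remaining)
-- ===== Notes on version B (the rewrite author's own statement) =====
-- stated objective: alternative
-- what changed: Inverts the traversal: instead of looping over the four browser-header constants and testing each against a set of lowercased keys rebuilt per constant, B makes one pass over the input keys, deleting each matched name from a shrinking worklist of lowercased browser names, and returns how many names were eliminated.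
import Mathlib
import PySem

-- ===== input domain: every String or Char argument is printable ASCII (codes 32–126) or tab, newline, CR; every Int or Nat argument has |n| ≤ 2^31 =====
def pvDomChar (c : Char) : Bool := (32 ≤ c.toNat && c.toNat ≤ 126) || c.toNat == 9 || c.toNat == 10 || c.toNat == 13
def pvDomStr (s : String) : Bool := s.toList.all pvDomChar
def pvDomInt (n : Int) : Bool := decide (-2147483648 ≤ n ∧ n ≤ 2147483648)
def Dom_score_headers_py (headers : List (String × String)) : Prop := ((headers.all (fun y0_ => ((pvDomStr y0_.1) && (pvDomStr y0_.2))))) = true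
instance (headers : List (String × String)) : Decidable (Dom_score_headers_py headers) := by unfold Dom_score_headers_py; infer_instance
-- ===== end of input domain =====

-- B inverts the traversal: one pass over the input keys eliminating matched names from a shrinking worklist, instead of A's loop over the four constants against a rebuilt key set (alternative; same result).


-- ===== PORT A =====
-- literal transliteration of A: empty guard, then a counting loop over the four
-- browser-header constants, rebuilding the lowercased-key set per iteration as A does.
def pvBrowserHeaders : List String := ["Accept", "Accept-Language", "Accept-Encoding", "Connection"]

def score_headers_py (headers : List (String × String)) : Int :=
  if headers = [] then 0
  else
    pvBrowserHeaders.foldl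
      (fun score h =>
        if (PySem.Set.contains
              (PySem.Set.ofList (headers.map (fun k => PySem.Str.lower k.1)))
              (PySem.Str.lower h)) then score + 1 else score)
      0

-- ===== PORT B =====
-- B: one pass over the input keys; each lowercased key removes its match (list.remove =
-- first occurrence = List.erase) from the worklist of lowercased browser names.
def score_headers_py_alt (headers : List (String × String)) : Int :=
  let remaining :=
    headers.foldl
      (fun rem k =>
        let kl := PySem.Str.lower k.1
        if kl ∈ rem then rem.erase kl else rem)
      (pvBrowserHeaders.map PySem.Str.lower)
  (pvBrowserHeaders.length : Int) - (remaining.length : Int)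

-- ===== PRECONDITION & SPEC =====
def Spec_score_headers_py (headers : List (String × String)) (out : Int) : Prop := out = score_headers_py_alt headers
instance (headers : List (String × String)) (out : Int) : Decidable (Spec_score_headers_py headers out) := by unfold Spec_score_headers_py; infer_instance

-- ===== CLAIM (what is proved, stated in full; the proofs are below) =====
def Claim_equal_score_headers_py : Prop := ∀ (headers : List (String × String)), Dom_score_headers_py headers → Spec_score_headers_py headers (score_headers_py headers)

-- ===== LEMMAS AND PROOFS =====

-- A's loop over t counting membership in L equals the length of t filtered by membership in L.
theorem pv_foldl_count (t : List String) (L : List String) (z : Int) :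
    t.foldl (fun score h => if PySem.Str.lower h ∈ L then score + 1 else score) z
      = z + ((t.filter (fun h => decide (PySem.Str.lower h ∈ L))).length : Int) := by
  induction t generalizing z with
  | nil => simp
  | cons x xs ih =>
      rw [List.foldl_cons, ih, List.filter_cons]
      by_cases hx : PySem.Str.lower x ∈ L
      · simp [hx]; omega
      · simp [hx]

-- B's fold: removing the elements of l from a nodup worklist leaves exactly the non-members of l.
theorem pv_fold_remove {α : Type} [DecidableEq α] (l : List α) (rem : List α) (h : rem.Nodup) :
    l.foldl (fun r k => if k ∈ r then r.erase k else r) rem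
      = rem.filter (fun x => decide (x ∉ l)) := by
  induction l generalizing rem with
  | nil => simp
  | cons a l ih =>
      rw [List.foldl_cons]
      have hstep : (if a ∈ rem then rem.erase a else rem) = rem.filter (fun x => decide (x ≠ a)) := by
        by_cases ha : a ∈ rem
        · rw [if_pos ha, List.Nodup.erase_eq_filter h]
          congr 1; funext x; simp [bne, beq_eq_decide, eq_comm]
        · rw [if_neg ha]
          refine (List.filter_eq_self.2 ?_).symm
          intro x hx
          simp only [decide_eq_true_eq]
          rintro rfl; exact ha hx
      rw [hstep, ih _ (h.filter _), List.filter_filter]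
      congr 1
      funext x
      simp [List.mem_cons, not_or, Bool.and_comm]

-- ===== VERDICT (by name: the statement is the Claim_ definition above) =====
theorem score_headers_py_spec : Claim_equal_score_headers_py := by
  intro headers _
  unfold Spec_score_headers_py score_headers_py score_headers_py_alt
  by_cases hemp : headers = []
  · subst hemp; decide
  · have h1 :
        headers.foldl
          (fun rem k => if PySem.Str.lower k.1 ∈ rem then rem.erase (PySem.Str.lower k.1) else rem)
          (pvBrowserHeaders.map PySem.Str.lower)
          = (pvBrowserHeaders.map PySem.Str.lower).filter
              (fun x => decide (x ∉ headers.map (fun k => PySem.Str.lower k.1))) := by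
      rw [(List.foldl_map (f := fun k => PySem.Str.lower k.1)
            (g := fun r kl => if kl ∈ r then r.erase kl else r)
            (l := headers) (init := pvBrowserHeaders.map PySem.Str.lower)).symm]
      exact pv_fold_remove _ _ (by decide)
    simp only [hemp, if_false, PySem.Set.contains_eq_listContains, List.contains_eq_mem,
      PySem.Set.mem_ofList, decide_eq_true_eq]
    rw [pv_foldl_count, h1, List.filter_map, List.length_map]
    have hsplit :
        pvBrowserHeaders.length
          = (pvBrowserHeaders.filter
              (fun h => decide (PySem.Str.lower h ∈ headers.map (fun k => PySem.Str.lower k.1)))).length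
            + (pvBrowserHeaders.filter
              (fun h => !decide (PySem.Str.lower h ∈ headers.map (fun k => PySem.Str.lower k.1)))).length :=
      List.length_eq_length_filter_add _
    have hcomp :
        (pvBrowserHeaders.filter
            ((fun x => decide (x ∉ headers.map (fun k => PySem.Str.lower k.1))) ∘ PySem.Str.lower)).length
          = (pvBrowserHeaders.filter
              (fun h => !decide (PySem.Str.lower h ∈ headers.map (fun k => PySem.Str.lower k.1)))).length := by
      refine congrArg List.length (List.filter_congr ?_)
      intro x _
      simp [Function.comp, decide_not]
    rw [hcomp]
    omega
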